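-- pv_equiv track=rewrite | github.com/Vem10/21052803_AI | assignment-3/first.py | result
-- ===== SOURCE A (Python) =====
-- def result(board, action, player):
--     new_board = list(board)
--     new_board[action] = 'B' if player == 1 else 'W'
--
--     for i in range(len(new_board)):
--         if new_board[i] == 'B' and (i > 0 and new_board[i - 1] == 'W'):
--             new_board[i] = 'W'
--         elif new_board[i] == 'W' and (i > 0 and new_board[i - 1] == 'B'):
--             new_board[i] = 'B'
--
--     return ''.join(new_board)
--
-- board = "0000W00BBW0"
-- ===== SOURCE B (Python) =====
-- def result(board, action, player):
--     new_board = list(board)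
--     new_board[action] = 'B' if player == 1 else 'W'
--
--     parts = []
--     i = 0
--     n = len(new_board)
--     while i < n:
--         c = new_board[i]
--         if c in ('B', 'W'):
--             j = i + 1
--             while j < n and new_board[j] in ('B', 'W'):
--                 j += 1
--             parts.append(c * (j - i))
--             i = j
--         else:
--             parts.append(c)
--             i += 1
--     return ''.join(parts)
-- ===== Notes on version B (the rewrite author's own statement) =====
-- stated objective: alternative
-- what changed: A flips each cell by comparing it with the (already-updated) previous cell in a per-index pass; B instead scans maximal runs of piece characters and emits each whole run as its first character repeated, leaving non-piece characters untouched.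
import Mathlib
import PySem

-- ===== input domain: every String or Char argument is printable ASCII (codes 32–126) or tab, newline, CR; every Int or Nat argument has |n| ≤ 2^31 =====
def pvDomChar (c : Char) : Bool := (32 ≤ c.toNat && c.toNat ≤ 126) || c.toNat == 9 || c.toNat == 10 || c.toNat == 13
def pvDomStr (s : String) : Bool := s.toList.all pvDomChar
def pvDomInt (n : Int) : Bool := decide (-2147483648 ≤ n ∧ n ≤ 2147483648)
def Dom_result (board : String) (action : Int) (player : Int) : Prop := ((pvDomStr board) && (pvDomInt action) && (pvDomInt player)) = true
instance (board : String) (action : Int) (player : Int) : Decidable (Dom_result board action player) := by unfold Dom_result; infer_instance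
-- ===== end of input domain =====

-- B replaces A's per-cell flip loop (compare with the already-updated previous cell) by a
-- run-based scan: each maximal run of 'B'/'W' cells is emitted as its first cell repeated.
-- Objective: alternative decomposition, same asymptotic cost.

-- ===== PORT A =====
-- one step of A's for-loop body (at index i, with short-circuited 'i > 0 and new_board[i-1] == …')
def resultStepA (nb : List Char) (i : Int) : List Char :=
  if PySem.List.pyGet? nb i = some 'B' ∧ i > 0 ∧ PySem.List.pyGet? nb (i - 1) = some 'W' then
    PySem.List.pySetD nb i 'W'
  else if PySem.List.pyGet? nb i = some 'W' ∧ i > 0 ∧ PySem.List.pyGet? nb (i - 1) = some 'B' then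
    PySem.List.pySetD nb i 'B'
  else nb

def result (board : String) (action : Int) (player : Int) : String :=
  let new_board := PySem.List.pySetD board.toList action (if player == 1 then 'B' else 'W')
  let final := (PySem.List.pyRange 0 (new_board.length : Int) 1).foldl resultStepA new_board
  String.ofList final   -- ''.join over single characters

-- ===== PORT B =====
def isPiece (c : Char) : Bool := c == 'B' || c == 'W'

-- B's outer while-loop: on a piece run, emit its first char (j - i) times and jump to j;
-- otherwise copy the char
def spreadRuns : List Char → List Char
  | [] => []
  | c :: rest =>
    if isPiece c then
      List.replicate ((rest.takeWhile isPiece).length + 1) c ++ spreadRuns (rest.dropWhile isPiece)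
    else c :: spreadRuns rest
termination_by l => l.length
decreasing_by
  · simpa using Nat.lt_succ_of_le (List.length_dropWhile_le _ _)
  · simp

def result_alt (board : String) (action : Int) (player : Int) : String :=
  let new_board := PySem.List.pySetD board.toList action (if player == 1 then 'B' else 'W')
  String.ofList (spreadRuns new_board)

-- ===== PRECONDITION & SPEC =====
-- Pre_ excludes exactly the inputs where `new_board[action] = …` raises IndexError in Python A.
def Pre_result (board : String) (action : Int) (player : Int) : Prop :=
  PySem.Raise.InRange board.toList.length action
instance (board : String) (action : Int) (player : Int) : Decidable (Pre_result board action player) := by unfold Pre_result; infer_instance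

def pvWitness_result : String × Int × Int := ("0000W00BBW0", 6, 1)

def Spec_result (board : String) (action : Int) (player : Int) (out : String) : Prop := out = result_alt board action player
instance (board : String) (action : Int) (player : Int) (out : String) : Decidable (Spec_result board action player out) := by unfold Spec_result; infer_instance

-- ===== CLAIM (what is proved, stated in full; the proofs are below) =====
def Claim_equal_result : Prop := ∀ (board : String) (action : Int) (player : Int), Dom_result board action player → Pre_result board action player → Spec_result board action player (result board action player)

-- ===== LEMMAS AND PROOFS =====

-- A's settled value at a cell, as a left-to-right scan carrying the previous OUTPUT cell
def scanA : Char → List Char → List Char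
  | _, [] => []
  | p, c :: rest =>
    let c' := if isPiece c && isPiece p then p else c
    c' :: scanA c' rest

theorem set_append_length {α : Type} (u : List α) (c x : α) (v : List α) :
    (u ++ c :: v).set u.length x = u ++ x :: v := by
  induction u with
  | nil => simp
  | cons a u ih => simp [ih]

theorem resultStepA_spec (u' : List Char) (p c : Char) (v : List Char) :
    resultStepA (u' ++ p :: c :: v) ((u'.length : Int) + 1) =
      u' ++ p :: (if isPiece c && isPiece p then p else c) :: v := by
  have e1 : (u' ++ p :: c :: v) = (u' ++ [p]) ++ c :: v := by simp
  have elen : (((u' ++ [p]).length : Nat) : Int) = (u'.length : Int) + 1 := by simp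
  have hget : PySem.List.pyGet? (u' ++ p :: c :: v) ((u'.length : Int) + 1) = some c := by
    rw [e1, ← elen]; exact PySem.List.pyGet?_append_length _ _ _
  have hget' : PySem.List.pyGet? (u' ++ p :: c :: v) ((u'.length : Int) + 1 - 1) = some p := by
    simp [PySem.List.pyGet?_append_length u' (c :: v) p]
  have hset : ∀ x, PySem.List.pySetD (u' ++ p :: c :: v) ((u'.length : Int) + 1) x = u' ++ p :: x :: v := by
    intro x
    rw [e1, ← elen, PySem.List.pySetD_natCast]
    have : (u' ++ [p]).length = u'.length + 1 := by simp
    rw [set_append_length]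
    simp
  have hpos : ((u'.length : Int) + 1) > 0 := by positivity
  simp only [resultStepA, hget, hget', hset, Option.some_inj, hpos, true_and]
  by_cases hc : c = 'B' <;> by_cases hp : p = 'W' <;> by_cases hc2 : c = 'W' <;> by_cases hp2 : p = 'B' <;>
    simp_all [isPiece]

theorem foldl_stepA (v : List Char) : ∀ (u' : List Char) (p : Char),
    List.foldl resultStepA (u' ++ p :: v)
      (PySem.List.pyRange ((u'.length : Int) + 1) ((u'.length : Int) + 1 + v.length) 1) =
      u' ++ p :: scanA p v := by
  induction v with
  | nil =>
    intro u' p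
    rw [PySem.List.pyRange_one_eq_nil (by simp)]
    simp [scanA]
  | cons c v' ih =>
    intro u' p
    rw [PySem.List.pyRange_one_cons (by simp only [List.length_cons]; push_cast; omega)]
    rw [List.foldl_cons, resultStepA_spec]
    have h2 := ih (u' ++ [p]) (if isPiece c && isPiece p then p else c)
    have e1 : (((u' ++ [p]).length : Nat) : Int) + 1 = (u'.length : Int) + 1 + 1 := by push_cast; simp
    have e2 : (u'.length : Int) + 1 + 1 + ((v'.length : Nat) : Int)
        = (u'.length : Int) + 1 + (((c :: v').length : Nat) : Int) := by push_cast [List.length_cons]; ring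
    rw [e1, e2] at h2
    simp only [List.append_assoc, List.cons_append, List.nil_append] at h2
    rw [h2]
    simp [scanA]

theorem scanA_spec (l : List Char) : ∀ (p : Char),
    (isPiece p = true → scanA p l =
        List.replicate (l.takeWhile isPiece).length p ++ spreadRuns (l.dropWhile isPiece)) ∧
    (isPiece p = false → scanA p l = spreadRuns l) := by
  induction l with
  | nil => intro p; refine ⟨fun _ => ?_, fun _ => ?_⟩ <;> simp [scanA, spreadRuns]
  | cons c r ih =>
    intro p
    refine ⟨fun hp => ?_, fun hp => ?_⟩
    · by_cases hc : isPiece c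
      · simp only [scanA, hc, hp, Bool.and_self, if_true, List.takeWhile_cons, List.dropWhile_cons]
        rw [(ih p).1 hp]
        simp [List.replicate_succ]
      · have hc' : isPiece c = false := by simpa using hc
        simp only [scanA, hc', hp, Bool.false_and, Bool.false_eq_true, if_false, List.takeWhile_cons, List.dropWhile_cons]
        rw [(ih c).2 hc']
        simp [hc', spreadRuns]
    · by_cases hc : isPiece c
      · simp only [scanA, hc, hp, Bool.and_false, Bool.false_eq_true, if_false]
        rw [spreadRuns, if_pos hc, (ih c).1 hc]
        simp [List.replicate_succ]
      · have hc' : isPiece c = false := by simpa using hc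
        simp only [scanA, hc', hp, Bool.false_and, Bool.false_eq_true, if_false]
        rw [(ih c).2 hc']
        simp [hc', spreadRuns]

theorem spreadRuns_eq_scanA (c : Char) (rest : List Char) :
    spreadRuns (c :: rest) = c :: scanA c rest := by
  by_cases hc : isPiece c
  · rw [spreadRuns, if_pos hc, (scanA_spec rest c).1 hc]
    simp [List.replicate_succ]
  · have hc' : isPiece c = false := by simpa using hc
    rw [spreadRuns, if_neg hc, (scanA_spec rest c).2 hc']

-- ===== VERDICT (by name: the statement is the Claim_ definition above) =====
theorem result_spec : Claim_equal_result := by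
  unfold Claim_equal_result
  intro board action player _hdom hpre
  unfold Spec_result result result_alt
  have hlen : (PySem.List.pySetD board.toList action
      (if player == 1 then 'B' else 'W')).length = board.toList.length :=
    PySem.List.length_pySetD _ _ _
  have hpos : 0 < board.toList.length := by
    unfold Pre_result PySem.Raise.InRange at hpre
    omega
  obtain ⟨c, rest, hcr⟩ : ∃ c rest,
      PySem.List.pySetD board.toList action (if player == 1 then 'B' else 'W') = c :: rest := by
    rcases h : PySem.List.pySetD board.toList action (if player == 1 then 'B' else 'W') with _ | ⟨c, rest⟩
    · exfalso
      rw [h] at hlen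
      simp only [List.length_nil] at hlen
      omega
    · exact ⟨c, rest, rfl⟩
  simp only [hcr]
  congr 1
  have h0 : resultStepA (c :: rest) 0 = c :: rest := by
    simp [resultStepA]
  have e : (((c :: rest).length : Nat) : Int) = 1 + (rest.length : Int) := by
    push_cast [List.length_cons]; ring
  rw [e, PySem.List.pyRange_one_cons (by omega), List.foldl_cons]
  norm_num [h0]
  rw [spreadRuns_eq_scanA]
  simpa using foldl_stepA rest [] c
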